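-- pv_equiv track=rewrite | github.com/Rlemons12/au_cetac_maint | modules/emtac_ai/training_scripts/performance_tst_model/comprehensive_drawing_test.py | extract_entities_from_prediction
-- ===== SOURCE A (Python) =====
-- from typing import Dict, List, Tuple, Optional
--
-- def extract_entities_from_prediction(results: List[Dict]) -> Dict[str, List[str]]:
--     """Extract entities from model prediction results."""
--     entities = {
--         'EQUIPMENT_NUMBER': [],
--         'EQUIPMENT_NAME': [],
--         'DRAWING_NUMBER': [],
--         'DRAWING_NAME': [],
--         'SPARE_PART_NUMBER': []
--     }
--
--     for result in results:
--         entity_type = result['entity_group'].replace('B-', '').replace('I-', '')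
--         if entity_type in entities:
--             # Clean up tokenizer artifacts (##)
--             word = result['word'].replace('##', '')
--             entities[entity_type].append(word)
--
--     # Join subword tokens for each entity type
--     for entity_type in entities:
--         if entities[entity_type]:
--             entities[entity_type] = [' '.join(entities[entity_type])]
--
--     return entities
-- ===== SOURCE B (Python) =====
-- ENTITY_TYPES = ['EQUIPMENT_NUMBER', 'EQUIPMENT_NAME', 'DRAWING_NUMBER',
--                 'DRAWING_NAME', 'SPARE_PART_NUMBER']
--
-- def extract_entities_from_prediction(results):
--     """Extract entities from model prediction results."""
--     out = {}
--     for entity_type in ENTITY_TYPES: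
--         words = [r['word'].replace('##', '')
--                  for r in results
--                  if r['entity_group'].replace('B-', '').replace('I-', '') == entity_type]
--         out[entity_type] = [' '.join(words)] if words else []
--     return out
-- ===== Notes on version B (the rewrite author's own statement) =====
-- stated objective: alternative
-- what changed: Replaces the single mutating-dict grouping pass plus in-place join pass with five independent per-type filter-map scans that build the result dict directly, one key at a time.
import Mathlib
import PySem

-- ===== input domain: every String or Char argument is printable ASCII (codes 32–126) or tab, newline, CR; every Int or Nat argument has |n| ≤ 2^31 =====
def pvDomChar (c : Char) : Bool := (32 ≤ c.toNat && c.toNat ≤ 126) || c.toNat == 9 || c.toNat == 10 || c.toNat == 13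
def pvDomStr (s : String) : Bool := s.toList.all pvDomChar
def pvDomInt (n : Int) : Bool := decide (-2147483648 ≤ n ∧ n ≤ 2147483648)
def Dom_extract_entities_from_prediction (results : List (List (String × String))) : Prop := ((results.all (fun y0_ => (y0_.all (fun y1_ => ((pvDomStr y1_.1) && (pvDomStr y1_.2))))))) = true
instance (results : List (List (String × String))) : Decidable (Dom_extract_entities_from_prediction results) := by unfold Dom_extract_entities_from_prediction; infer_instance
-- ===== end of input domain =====

-- B replaces A's single mutating-dict grouping pass (plus an in-place join pass) by five
-- independent per-type filter-map scans building the result one key at a time (alternative decomposition).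

-- shared helpers: the cleaned entity type and the cleaned word of a prediction entry
def pvCleanType (g : String) : String :=
  PySem.Str.replace (PySem.Str.replace g "B-" "") "I-" ""

def pvCleanWord (w : String) : String := PySem.Str.replace w "##" ""

def pvTypes : List String :=
  ["EQUIPMENT_NUMBER", "EQUIPMENT_NAME", "DRAWING_NUMBER", "DRAWING_NAME", "SPARE_PART_NUMBER"]

-- ===== PORT A =====
-- body of A's grouping loop, named so the proofs can speak about one step
def pvStepA (ents : PySem.Dict String (List String)) (r : List (String × String)) :
    PySem.Dict String (List String) :=
  let entity_type := pvCleanType (((PySem.Dict.mk r).get? "entity_group").getD "")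
  if ents.contains entity_type then
    let word := pvCleanWord (((PySem.Dict.mk r).get? "word").getD "")
    ents.modify entity_type [] (· ++ [word])
  else ents

def extract_entities_from_prediction (results : List (List (String × String))) : List (String × List String) :=
  -- grouping pass over results, then the join pass over the dict's entries
  ((results.foldl pvStepA (PySem.Dict.mk (pvTypes.map (fun t => (t, []))))).items).map
    (fun p => (p.1, if p.2.isEmpty then p.2 else [PySem.Str.join " " p.2]))

-- ===== PORT B =====
def extract_entities_from_prediction_alt (results : List (List (String × String))) : List (String × List String) :=
  pvTypes.map (fun entity_type =>
    let words :=
      (results.filter (fun r =>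
          pvCleanType (((PySem.Dict.mk r).get? "entity_group").getD "") == entity_type)).map
        (fun r => pvCleanWord (((PySem.Dict.mk r).get? "word").getD ""))
    (entity_type, if words.isEmpty then [] else [PySem.Str.join " " words]))

-- ===== PRECONDITION & SPEC =====
-- Pre_ excludes exactly the inputs where Python A raises KeyError: an entry without an
-- 'entity_group' key, or an entry whose cleaned type is one of the five but lacks a 'word' key.
def Pre_extract_entities_from_prediction (results : List (List (String × String))) : Prop :=
  ∀ r ∈ results,
    ((PySem.Dict.mk r).get? "entity_group").isSome = true ∧
    (pvCleanType (((PySem.Dict.mk r).get? "entity_group").getD "") ∈ pvTypes →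
      ((PySem.Dict.mk r).get? "word").isSome = true)
instance (results : List (List (String × String))) : Decidable (Pre_extract_entities_from_prediction results) := by unfold Pre_extract_entities_from_prediction; infer_instance

def pvWitness_extract_entities_from_prediction : (List (List (String × String))) :=
  [[("entity_group", "B-EQUIPMENT_NAME"), ("word", "pump")],
   [("entity_group", "O")]]

def Spec_extract_entities_from_prediction (results : List (List (String × String))) (out : List (String × List String)) : Prop := out = extract_entities_from_prediction_alt results
instance (results : List (List (String × String))) (out : List (String × List String)) : Decidable (Spec_extract_entities_from_prediction results out) := by unfold Spec_extract_entities_from_prediction; infer_instance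

-- ===== CLAIM (what is proved, stated in full; the proofs are below) =====
def Claim_equal_extract_entities_from_prediction : Prop := ∀ (results : List (List (String × String))), Dom_extract_entities_from_prediction results → Pre_extract_entities_from_prediction results → Spec_extract_entities_from_prediction results (extract_entities_from_prediction results)

-- ===== LEMMAS AND PROOFS =====

-- the cleaned type and word of one entry
def pvKeyOf (r : List (String × String)) : String :=
  pvCleanType (((PySem.Dict.mk r).get? "entity_group").getD "")
def pvWordOf (r : List (String × String)) : String :=
  pvCleanWord (((PySem.Dict.mk r).get? "word").getD "")

-- what A's grouping fold collects for one type
def pvCollect (t : String) (rs : List (List (String × String))) : List String :=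
  (rs.filter (fun r => pvKeyOf r == t)).map pvWordOf

-- one step of A's fold on a dict whose items are pvTypes paired with arbitrary values
lemma pvStep_char (g : String → List String) (r : List (String × String)) :
    pvStepA (PySem.Dict.mk (pvTypes.map (fun t => (t, g t)))) r
    = PySem.Dict.mk (pvTypes.map (fun t =>
        (t, if pvKeyOf r == t then g t ++ [pvWordOf r] else g t))) := by
  simp only [pvTypes, List.map_cons, List.map_nil]
  by_cases h1 : pvKeyOf r = "EQUIPMENT_NUMBER" <;>
  by_cases h2 : pvKeyOf r = "EQUIPMENT_NAME" <;>
  by_cases h3 : pvKeyOf r = "DRAWING_NUMBER" <;>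
  by_cases h4 : pvKeyOf r = "DRAWING_NAME" <;>
  by_cases h5 : pvKeyOf r = "SPARE_PART_NUMBER" <;>
  simp_all [pvStepA, pvKeyOf, pvWordOf, PySem.Dict.contains, PySem.Dict.modify,
    PySem.Dict.insert, PySem.Dict.getD, PySem.Dict.get?, PySem.Dict.items, beq_iff_eq] <;>
  · intro hd
    rcases hd with h | h | h | h | h
    exacts [absurd h.symm h1, absurd h.symm h2, absurd h.symm h3, absurd h.symm h4,
      absurd h.symm h5]

-- A's grouping fold, characterised
lemma pvFold_char (rs : List (List (String × String))) :
    ∀ (g : String → List String),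
    rs.foldl pvStepA (PySem.Dict.mk (pvTypes.map (fun t => (t, g t))))
    = PySem.Dict.mk (pvTypes.map (fun t => (t, g t ++ pvCollect t rs))) := by
  induction rs with
  | nil => intro g; simp [pvCollect]
  | cons r rs ih =>
    intro g
    rw [List.foldl_cons, pvStep_char g r,
      ih (fun t => if pvKeyOf r == t then g t ++ [pvWordOf r] else g t)]
    refine congrArg PySem.Dict.mk ?_
    apply List.map_congr_left
    intro t _
    by_cases h : pvKeyOf r == t <;>
      simp [pvCollect, h]

-- the join pass returns [] on an empty group, which already IS the empty list
lemma pvJoin_eq (l : List String) :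
    (if l.isEmpty then l else [PySem.Str.join " " l])
      = (if l.isEmpty then [] else [PySem.Str.join " " l]) := by
  cases l <;> rfl

-- ===== VERDICT (by name: the statement is the Claim_ definition above) =====
theorem extract_entities_from_prediction_spec : Claim_equal_extract_entities_from_prediction := by
  intro results _ _
  unfold Spec_extract_entities_from_prediction
  unfold extract_entities_from_prediction extract_entities_from_prediction_alt
  rw [pvFold_char results (fun _ => [])]
  simp only [List.map_map]
  apply List.map_congr_left
  intro t _
  simp only [Function.comp_apply, List.nil_append, pvJoin_eq]
  rfl
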